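-- pv_equiv track=rewrite | github.com/j0k/algopractice | seq/maxsubseq/mss4.py | mseq
-- ===== SOURCE A (Python) =====
-- def mseq(a):
--     d = 0
--
--     if len(a)<=1:
--         return d
--
--     m, M, el = a[0], a[0], a[0]
--
--     trend = 0
--
--     for i,e in enumerate(a):
--         if trend == 0:
--             if e == el:
--                 continue
--             elif e > el:
--                 trend = 1
--                 m = min(m, e)
--                 M = max(M, e)
--             else:
--                 trend = -1
--                 m = min(m, e)
--                 M = max(M, e)
--         elif trend == 1:
--             if e == el:
--                 continue
--             elif e > el:
--                 m = min(m, e)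
--                 M = max(M, e)
--             else:
--                 trend = -1
--                 m = min(el, e)
--                 M = max(el, e)
--         elif trend == -1:
--             if e == el:
--                 continue
--             elif e < el:
--                 m = min(m, e)
--                 M = max(M, e)
--             else:
--                 trend = 1
--                 m = min(el, e)
--                 M = max(el, e)
--         el = e
--         d2 = max(d, M - m)
--
--         if d2 > d:
--             d = d2
--     return d
-- ===== SOURCE B (Python) =====
-- def mseq(a):
--     # Two-pass decomposition: collapse equal runs, collect turning points
--     # (local extrema incl. first and last), then take the largest absolute
--     # difference between consecutive extrema.
--     if len(a) <= 1:
--         return 0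
--     vals = [a[0]]
--     for e in a[1:]:
--         if e != vals[-1]:
--             vals.append(e)
--     if len(vals) == 1:
--         return 0
--     ext = [vals[0]]
--     for x, y, z in zip(vals, vals[1:], vals[2:]):
--         if (y > x) != (z > y):
--             ext.append(y)
--     ext.append(vals[-1])
--     best = 0
--     for p, q in zip(ext, ext[1:]):
--         best = max(best, abs(q - p))
--     return best
-- ===== Notes on version B (the rewrite author's own statement) =====
-- stated objective: simpler
-- what changed: Replaced A's fused five-variable trend state machine (d/m/M/el/trend with per-branch min/max resets) by a two-pass decomposition: collapse equal-value runs and collect the turning points (local extrema including first and last), then return the maximum absolute difference between consecutive extrema.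
import Mathlib
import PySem

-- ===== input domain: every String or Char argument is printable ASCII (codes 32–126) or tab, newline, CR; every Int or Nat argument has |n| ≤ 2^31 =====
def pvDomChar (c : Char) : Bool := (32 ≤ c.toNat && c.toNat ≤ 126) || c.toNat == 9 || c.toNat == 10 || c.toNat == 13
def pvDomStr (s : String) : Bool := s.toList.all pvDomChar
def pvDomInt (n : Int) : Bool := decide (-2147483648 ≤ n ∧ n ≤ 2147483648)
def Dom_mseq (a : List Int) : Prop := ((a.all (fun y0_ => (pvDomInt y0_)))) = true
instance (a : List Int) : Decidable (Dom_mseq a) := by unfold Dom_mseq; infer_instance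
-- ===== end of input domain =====

-- B replaces A's fused five-variable trend state machine by a two-pass
-- build-extrema-then-reduce decomposition (objective: simpler). Same O(n) cost.

-- ===== PORT A =====
-- loop body of A; state (d, m, M, el, trend); the trailing 'el = e; d2 = ...' lines
-- shared by all non-continue branches are the helper mfin.
def mfin (d m M el tr : Int) : Int × Int × Int × Int × Int :=
  let d2 := max d (M - m)
  ((if d2 > d then d2 else d), m, M, el, tr)

def mstep (s : Int × Int × Int × Int × Int) (e : Int) : Int × Int × Int × Int × Int :=
  let (d, m, M, el, tr) := s
  if tr = 0 then
    if e = el then s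
    else if e > el then mfin d (min m e) (max M e) e 1
    else mfin d (min m e) (max M e) e (-1)
  else if tr = 1 then
    if e = el then s
    else if e > el then mfin d (min m e) (max M e) e 1
    else mfin d (min el e) (max el e) e (-1)
  else if tr = -1 then
    if e = el then s
    else if e < el then mfin d (min m e) (max M e) e (-1)
    else mfin d (min el e) (max el e) e 1
  else mfin d m M e tr

def mseq (a : List Int) : Int :=
  match a with
  | [] => 0
  | [_] => 0
  | a0 :: _ => (a.foldl mstep (0, a0, a0, a0, 0)).1

-- ===== PORT B =====
-- first pass of Source B: vals = collapse of runs of equal consecutive values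
def collapse : Int → List Int → List Int
  | _, [] => []
  | p, e :: t => if e = p then collapse p t else e :: collapse e t

-- second pass of Source B: interior turning points over triples, plus the final value
def extAux : Int → Int → List Int → List Int
  | _, y, [] => [y]
  | x, y, z :: t => if decide (y > x) ≠ decide (z > y) then y :: extAux y z t else extAux y z t

-- final pass of Source B: best = max of |q - p| over consecutive pairs of ext
def gmax : Int → Int → List Int → Int
  | d, _, [] => d
  | d, p, q :: r => gmax (max d |q - p|) q r

def mseq_alt (a : List Int) : Int :=
  match a with
  | [] => 0
  | a0 :: rest =>
    if rest.isEmpty then 0                      -- len(a) <= 1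
    else match collapse a0 rest with
    | [] => 0                                   -- len(vals) == 1
    | v1 :: vt => gmax 0 a0 (extAux a0 v1 vt)   -- ext = a0 :: extAux a0 v1 vt; fold its pairs

-- ===== PRECONDITION & SPEC =====
def Spec_mseq (a : List Int) (out : Int) : Prop := out = mseq_alt a
instance (a : List Int) (out : Int) : Decidable (Spec_mseq a out) := by unfold Spec_mseq; infer_instance

-- ===== CLAIM (what is proved, stated in full; the proofs are below) =====
def Claim_equal_mseq : Prop := ∀ (a : List Int), Dom_mseq a → Spec_mseq a (mseq a)

-- ===== LEMMAS AND PROOFS =====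

theorem mstep_skip (d m M el tr : Int) (htr : tr = 0 ∨ tr = 1 ∨ tr = -1) :
    mstep (d, m, M, el, tr) el = (d, m, M, el, tr) := by
  rcases htr with h | h | h <;> subst h <;> simp [mstep]

theorem mstep_el (d m M el tr e : Int) (htr : tr = 0 ∨ tr = 1 ∨ tr = -1) (he : e ≠ el) :
    (mstep (d, m, M, el, tr) e).2.2.2.1 = e ∧
    ((mstep (d, m, M, el, tr) e).2.2.2.2 = 1 ∨ (mstep (d, m, M, el, tr) e).2.2.2.2 = -1) := by
  rcases htr with h | h | h <;> subst h <;>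
    simp only [mstep, mfin, if_neg he] <;> split_ifs <;> norm_num

-- A skips elements equal to the previous one, so its loop only sees the collapsed list
theorem foldl_collapse (l : List Int) : ∀ (d m M el tr : Int),
    (tr = 0 ∨ tr = 1 ∨ tr = -1) →
    List.foldl mstep (d, m, M, el, tr) l = List.foldl mstep (d, m, M, el, tr) (collapse el l) := by
  induction l with
  | nil => intro _ _ _ _ _ _; rfl
  | cons e t ih =>
    intro d m M el tr htr
    by_cases he : e = el
    · rw [he, collapse, if_pos rfl, List.foldl_cons, mstep_skip d m M el tr htr]
      exact ih d m M el tr htr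
    · obtain ⟨hel, htr'⟩ := mstep_el d m M el tr e htr he
      rcases hm : mstep (d, m, M, el, tr) e with ⟨d', m', M', el', tr'⟩
      rw [hm] at hel htr'
      simp only at hel htr'
      rw [hel] at hm
      simp only [collapse, if_neg he, List.foldl_cons, hm]
      exact ih d' m' M' e tr' (Or.inr htr')

theorem collapse_chain (l : List Int) : ∀ p : Int, List.IsChain (· ≠ ·) (p :: collapse p l) := by
  induction l with
  | nil => intro p; simp [collapse]
  | cons e t ih =>
    intro p
    by_cases he : e = p
    · simpa [collapse, he] using ih p
    · rw [collapse, if_neg he, List.isChain_cons_cons]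
      exact ⟨Ne.symm he, ih e⟩

-- the first extremum of a strictly increasing run is ≥ the run's second value
theorem extAux_head_ge (l : List Int) : ∀ x y : Int, x < y → List.IsChain (· ≠ ·) (y :: l) →
    ∃ q r, extAux x y l = q :: r ∧ y ≤ q := by
  induction l with
  | nil => intro x y _ _; exact ⟨y, [], rfl, le_refl y⟩
  | cons z t ih =>
    intro x y hxy hch
    rw [List.isChain_cons_cons] at hch
    by_cases hc : decide (y > x) ≠ decide (z > y)
    · exact ⟨y, extAux y z t, by simp [extAux, hc], le_refl y⟩
    · have hzy : y < z := by
        by_contra h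
        exact hc (by simp [hxy, h])
      obtain ⟨q, r, hq, hle⟩ := ih y z hzy hch.2
      exact ⟨q, r, by simp [extAux, hc, hq], le_of_lt (lt_of_lt_of_le hzy hle)⟩

theorem extAux_head_le (l : List Int) : ∀ x y : Int, y < x → List.IsChain (· ≠ ·) (y :: l) →
    ∃ q r, extAux x y l = q :: r ∧ q ≤ y := by
  induction l with
  | nil => intro x y _ _; exact ⟨y, [], rfl, le_refl y⟩
  | cons z t ih =>
    intro x y hxy hch
    rw [List.isChain_cons_cons] at hch
    by_cases hc : decide (y > x) ≠ decide (z > y)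
    · exact ⟨y, extAux y z t, by simp [extAux, hc], le_refl y⟩
    · have hzy : z < y := by
        have h1 : ¬ (y > x) := not_lt.mpr (le_of_lt hxy)
        have h2 : ¬ (z > y) := by
          intro h2'
          exact hc (by simp [h1, h2'])
        exact lt_of_le_of_ne (not_lt.mp h2) hch.1.symm
      obtain ⟨q, r, hq, hle⟩ := ih y z hzy hch.2
      exact ⟨q, r, by simp [extAux, hc, hq], le_of_lt (lt_of_le_of_lt hle hzy)⟩

-- the first argument of extAux only matters through the sign of the first step
theorem extAux_sign (x x' y : Int) (l : List Int) (h : decide (y > x) = decide (y > x')) :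
    extAux x y l = extAux x' y l := by
  cases l with
  | nil => rfl
  | cons z t => simp only [extAux, h]

theorem gmax_absorb (L : List Int) (d c p q : Int) (r : List Int) (hL : L = q :: r)
    (h : c ≤ |q - p|) : gmax (max d c) p L = gmax d p L := by
  subst hL
  simp only [gmax]
  congr 1
  rcases abs_cases (q - p) with ⟨ha, _⟩ | ⟨ha, _⟩ <;> rw [ha] at h ⊢ <;> omega

theorem mfin_max (d m M el tr : Int) : mfin d m M el tr = (max d (M - m), m, M, el, tr) := by
  simp only [mfin]
  congr 1
  split_ifs <;> omega

-- main invariant: inside a monotone run anchored at a0 (the previous extremum), with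
-- el the current element, trend matching the run direction, and d already ≥ the
-- current run amplitude, A's loop computes gmax over the remaining extrema.
theorem main_run (l : List Int) : ∀ (d a0 el tr : Int),
    (tr = 1 ∧ a0 < el ∨ tr = -1 ∧ el < a0) → |el - a0| ≤ d →
    List.IsChain (· ≠ ·) (el :: l) →
    (List.foldl mstep (d, min a0 el, max a0 el, el, tr) l).1 = gmax d a0 (extAux a0 el l) := by
  induction l with
  | nil =>
    intro d a0 el tr _ hd _
    simp only [List.foldl_nil, extAux, gmax]
    rcases abs_cases (el - a0) with ⟨ha, _⟩ | ⟨ha, _⟩ <;> rw [ha] at hd ⊢ <;> omega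
  | cons e t ih =>
    intro d a0 el tr htr hd hch
    rw [List.isChain_cons_cons] at hch
    have he : e ≠ el := hch.1.symm
    have hch' : List.IsChain (· ≠ ·) (e :: t) := hch.2
    rcases htr with ⟨h1, hlt⟩ | ⟨h1, hlt⟩ <;> subst h1
    · -- trend 1, a0 < el
      have hmin : min a0 el = a0 := min_eq_left (le_of_lt hlt)
      have hmax : max a0 el = el := max_eq_right (le_of_lt hlt)
      rw [hmin, hmax]
      rcases lt_or_gt_of_ne he with hlt2 | hlt2
      · -- e < el : direction turn
        have hstep : mstep (d, a0, el, el, 1) e = (max d (el - e), min el e, max el e, e, -1) := by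
          simp only [mstep, mfin_max]
          split_ifs <;> first
            | exact absurd rfl (by assumption)
            | exact (by assumption : False).elim
            | (simp only [Prod.mk.injEq, and_true, true_and]; omega)
        rw [List.foldl_cons, hstep,
          ih (max d (el - e)) el e (-1) (Or.inr ⟨rfl, hlt2⟩)
            (by rcases abs_cases (e - el) with ⟨ha, _⟩ | ⟨ha, _⟩ <;> rw [ha] <;> omega) hch']
        -- RHS: el is kept as an extremum
        have hcond : decide (el > a0) ≠ decide (e > el) := by
          simp [hlt, not_lt.mpr (le_of_lt hlt2)]
        rw [show extAux a0 el (e :: t) = el :: extAux el e t by simp [extAux, hcond]]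
        obtain ⟨q, r, hq, hle⟩ := extAux_head_le t el e hlt2 hch'
        have h1 : gmax d a0 (el :: extAux el e t) = gmax d el (extAux el e t) := by
          simp only [gmax]
          congr 1
          rcases abs_cases (el - a0) with ⟨ha, _⟩ | ⟨ha, _⟩ <;> rw [ha] at hd ⊢ <;> omega
        rw [h1,
          gmax_absorb (extAux el e t) d (el - e) el q r hq
            (by rcases abs_cases (q - el) with ⟨ha, _⟩ | ⟨ha, _⟩ <;> rw [ha] <;> omega)]
      · -- el < e : run continues upward
        have hstep : mstep (d, a0, el, el, 1) e = (max d (e - a0), min a0 e, max el e, e, 1) := by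
          simp only [mstep, mfin_max]
          split_ifs <;> first
            | exact absurd rfl (by assumption)
            | exact (by assumption : False).elim
            | (simp only [Prod.mk.injEq, and_true, true_and]; omega)
        have hae : a0 < e := lt_trans hlt hlt2
        have hmin2 : min a0 e = a0 := min_eq_left (le_of_lt hae)
        have hmax2 : max el e = e := max_eq_right (le_of_lt hlt2)
        rw [List.foldl_cons, hstep, hmin2, hmax2,
          show ((max d (e - a0), a0, e, e, (1:Int)) : Int × Int × Int × Int × Int)
            = (max d (e - a0), min a0 e, max a0 e, e, 1) by
            rw [min_eq_left (le_of_lt hae), max_eq_right (le_of_lt hae)],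
          ih (max d (e - a0)) a0 e 1 (Or.inl ⟨rfl, hae⟩)
            (by rcases abs_cases (e - a0) with ⟨ha, _⟩ | ⟨ha, _⟩ <;> rw [ha] <;> omega) hch']
        -- RHS: el is skipped
        have hcond : ¬ (decide (el > a0) ≠ decide (e > el)) := by simp [hlt, hlt2]
        rw [show extAux a0 el (e :: t) = extAux el e t by simp [extAux, hcond],
          extAux_sign el a0 e t (by simp [hlt2, hae])]
        obtain ⟨q, r, hq, hle⟩ := extAux_head_ge t a0 e hae hch'
        rw [gmax_absorb (extAux a0 e t) d (e - a0) a0 q r hq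
          (by rcases abs_cases (q - a0) with ⟨ha, _⟩ | ⟨ha, _⟩ <;> rw [ha] <;> omega)]
    · -- trend -1, el < a0 (mirror)
      have hmin : min a0 el = el := min_eq_right (le_of_lt hlt)
      have hmax : max a0 el = a0 := max_eq_left (le_of_lt hlt)
      rw [hmin, hmax]
      rcases lt_or_gt_of_ne he with hlt2 | hlt2
      · -- e < el : run continues downward
        have hstep : mstep (d, el, a0, el, -1) e = (max d (a0 - e), min el e, max a0 e, e, -1) := by
          simp only [mstep, mfin_max]
          split_ifs <;> first
            | exact absurd rfl (by assumption)
            | exact (by assumption : False).elim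
            | (simp only [Prod.mk.injEq, and_true, true_and]; omega)
        have hae : e < a0 := lt_trans hlt2 hlt
        have hmin2 : min el e = e := min_eq_right (le_of_lt hlt2)
        have hmax2 : max a0 e = a0 := max_eq_left (le_of_lt hae)
        rw [List.foldl_cons, hstep, hmin2, hmax2,
          show ((max d (a0 - e), e, a0, e, (-1:Int)) : Int × Int × Int × Int × Int)
            = (max d (a0 - e), min a0 e, max a0 e, e, -1) by
            rw [min_eq_right (le_of_lt hae), max_eq_left (le_of_lt hae)],
          ih (max d (a0 - e)) a0 e (-1) (Or.inr ⟨rfl, hae⟩)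
            (by rcases abs_cases (e - a0) with ⟨ha, _⟩ | ⟨ha, _⟩ <;> rw [ha] <;> omega) hch']
        have hcond : ¬ (decide (el > a0) ≠ decide (e > el)) := by
          simp [not_lt.mpr (le_of_lt hlt), not_lt.mpr (le_of_lt hlt2)]
        rw [show extAux a0 el (e :: t) = extAux el e t by simp [extAux, hcond],
          extAux_sign el a0 e t (by simp [not_lt.mpr (le_of_lt hlt2), not_lt.mpr (le_of_lt hae)])]
        obtain ⟨q, r, hq, hle⟩ := extAux_head_le t a0 e hae hch'
        rw [gmax_absorb (extAux a0 e t) d (a0 - e) a0 q r hq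
          (by rcases abs_cases (q - a0) with ⟨ha, _⟩ | ⟨ha, _⟩ <;> rw [ha] <;> omega)]
      · -- el < e : direction turn
        have hstep : mstep (d, el, a0, el, -1) e = (max d (e - el), min el e, max el e, e, 1) := by
          simp only [mstep, mfin_max]
          split_ifs <;> first
            | exact absurd rfl (by assumption)
            | exact (by assumption : False).elim
            | (simp only [Prod.mk.injEq, and_true, true_and]; omega)
        rw [List.foldl_cons, hstep,
          ih (max d (e - el)) el e 1 (Or.inl ⟨rfl, hlt2⟩)
            (by rcases abs_cases (e - el) with ⟨ha, _⟩ | ⟨ha, _⟩ <;> rw [ha] <;> omega) hch']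
        have hcond : decide (el > a0) ≠ decide (e > el) := by
          simp [not_lt.mpr (le_of_lt hlt), hlt2]
        rw [show extAux a0 el (e :: t) = el :: extAux el e t by simp [extAux, hcond]]
        obtain ⟨q, r, hq, hle⟩ := extAux_head_ge t el e hlt2 hch'
        have h1 : gmax d a0 (el :: extAux el e t) = gmax d el (extAux el e t) := by
          simp only [gmax]
          congr 1
          rcases abs_cases (el - a0) with ⟨ha, _⟩ | ⟨ha, _⟩ <;> rw [ha] at hd ⊢ <;> omega
        rw [h1,
          gmax_absorb (extAux el e t) d (e - el) el q r hq
            (by rcases abs_cases (q - el) with ⟨ha, _⟩ | ⟨ha, _⟩ <;> rw [ha] <;> omega)]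

-- ===== VERDICT (by name: the statement is the Claim_ definition above) =====
theorem mseq_spec : Claim_equal_mseq := by
  intro a _
  unfold Spec_mseq
  match a with
  | [] => rfl
  | [_] => rfl
  | a0 :: a1 :: rest =>
    show (List.foldl mstep (0, a0, a0, a0, 0) (a0 :: a1 :: rest)).1 = _
    rw [List.foldl_cons, mstep_skip 0 a0 a0 a0 0 (Or.inl rfl),
      foldl_collapse (a1 :: rest) 0 a0 a0 a0 0 (Or.inl rfl)]
    have hch := collapse_chain (a1 :: rest) a0
    cases hcs : collapse a0 (a1 :: rest) with
    | nil => simp [mseq_alt, hcs]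
    | cons v1 vt =>
      rw [hcs] at hch
      rw [List.isChain_cons_cons] at hch
      have hne : v1 ≠ a0 := hch.1.symm
      have hch2 : List.IsChain (· ≠ ·) (v1 :: vt) := hch.2
      rcases lt_or_gt_of_ne hne with hlt | hlt
      · -- v1 < a0 : first step enters trend -1
        have hstep : mstep (0, a0, a0, a0, 0) v1 = (a0 - v1, min a0 v1, max a0 v1, v1, -1) := by
          simp only [mstep, mfin_max]
          split_ifs <;> first
            | exact absurd rfl (by assumption)
            | exact (by assumption : False).elim
            | (simp only [Prod.mk.injEq, and_true, true_and]; omega)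
        rw [List.foldl_cons, hstep,
          main_run vt (a0 - v1) a0 v1 (-1) (Or.inr ⟨rfl, hlt⟩)
            (by rcases abs_cases (v1 - a0) with ⟨ha, _⟩ | ⟨ha, _⟩ <;> rw [ha] <;> omega) hch2]
        obtain ⟨q, r, hq, hle⟩ := extAux_head_le vt a0 v1 hlt hch2
        rw [show mseq_alt (a0 :: a1 :: rest) = gmax 0 a0 (extAux a0 v1 vt) by
              simp [mseq_alt, hcs],
          show (a0 - v1 : Int) = max 0 (a0 - v1) by omega,
          gmax_absorb (extAux a0 v1 vt) 0 (a0 - v1) a0 q r hq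
            (by rcases abs_cases (q - a0) with ⟨ha, _⟩ | ⟨ha, _⟩ <;> rw [ha] <;> omega)]
      · -- a0 < v1 : first step enters trend 1
        have hstep : mstep (0, a0, a0, a0, 0) v1 = (v1 - a0, min a0 v1, max a0 v1, v1, 1) := by
          simp only [mstep, mfin_max]
          split_ifs <;> first
            | exact absurd rfl (by assumption)
            | exact (by assumption : False).elim
            | (simp only [Prod.mk.injEq, and_true, true_and]; omega)
        rw [List.foldl_cons, hstep,
          main_run vt (v1 - a0) a0 v1 1 (Or.inl ⟨rfl, hlt⟩)
            (by rcases abs_cases (v1 - a0) with ⟨ha, _⟩ | ⟨ha, _⟩ <;> rw [ha] <;> omega) hch2]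
        obtain ⟨q, r, hq, hle⟩ := extAux_head_ge vt a0 v1 hlt hch2
        rw [show mseq_alt (a0 :: a1 :: rest) = gmax 0 a0 (extAux a0 v1 vt) by
              simp [mseq_alt, hcs],
          show (v1 - a0 : Int) = max 0 (v1 - a0) by omega,
          gmax_absorb (extAux a0 v1 vt) 0 (v1 - a0) a0 q r hq
            (by rcases abs_cases (q - a0) with ⟨ha, _⟩ | ⟨ha, _⟩ <;> rw [ha] <;> omega)]
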